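-- pv_equiv track=rewrite | github.com/stallev/langs | scripts/group_words.py | classify_word
-- ===== SOURCE A (Python) =====
-- from typing import Dict, List, Tuple
--
-- def classify_word(word_data: Dict, topic_keywords: Dict[str, List[str]]) -> str:
--     """Классифицирует слово по темам на основе ключевых слов"""
--     word = word_data['word'].lower()
--
--     # Прямое совпадение
--     for topic, keywords in topic_keywords.items():
--         if word in [kw.lower() for kw in keywords]:
--             return topic
--
--     # Частичное совпадение
--     for topic, keywords in topic_keywords.items():
--         for keyword in keywords:
--             if keyword.lower() in word or word in keyword.lower():
--                 return topic
--
--     return "GENERAL & COMMON"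
-- ===== SOURCE B (Python) =====
-- def classify_word(word_data, topic_keywords):
--     """Single pass: return on first exact match, remember first substring-match topic as fallback."""
--     word = word_data['word'].lower()
--     fallback = None
--     for topic, keywords in topic_keywords.items():
--         lows = [kw.lower() for kw in keywords]
--         if word in lows:
--             return topic
--         if fallback is None and any(k in word or word in k for k in lows):
--             fallback = topic
--     return fallback if fallback is not None else "GENERAL & COMMON"
-- ===== Notes on version B (the rewrite author's own statement) =====
-- stated objective: alternative
-- what changed: Replaces A's two full passes (exact pass then substring pass) with one pass that returns immediately on an exact match and remembers only the first substring-matching topic as a fallback, lowercasing each topic's keywords once.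
import Mathlib
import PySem

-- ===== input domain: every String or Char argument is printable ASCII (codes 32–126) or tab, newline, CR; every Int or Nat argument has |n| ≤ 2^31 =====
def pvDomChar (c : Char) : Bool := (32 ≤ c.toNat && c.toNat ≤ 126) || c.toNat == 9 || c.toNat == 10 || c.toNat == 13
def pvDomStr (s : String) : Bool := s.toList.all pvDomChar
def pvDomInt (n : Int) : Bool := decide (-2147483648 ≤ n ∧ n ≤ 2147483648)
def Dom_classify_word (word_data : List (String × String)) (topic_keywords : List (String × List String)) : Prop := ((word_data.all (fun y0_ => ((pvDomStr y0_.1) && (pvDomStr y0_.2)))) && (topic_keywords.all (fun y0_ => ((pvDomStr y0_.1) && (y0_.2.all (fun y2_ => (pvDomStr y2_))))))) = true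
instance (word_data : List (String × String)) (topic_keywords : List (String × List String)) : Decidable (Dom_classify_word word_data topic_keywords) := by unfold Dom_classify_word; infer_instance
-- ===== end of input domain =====

-- B replaces A's two full passes with a single pass that returns on the first exact match
-- and remembers only the first substring-matching topic as a fallback (return value only).

-- ===== PORT A =====
-- first loop of A: exact match word in [kw.lower() for kw in keywords]
def pvExactLoop (word : String) : List (String × List String) → Option String
  | [] => none
  | (topic, keywords) :: rest =>
    if (keywords.map (fun kw => PySem.Str.lower kw)).contains word then some topic
    else pvExactLoop word rest

-- second loop of A: substring match keyword.lower() in word or word in keyword.lower()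
def pvSubLoop (word : String) : List (String × List String) → Option String
  | [] => none
  | (topic, keywords) :: rest =>
    if keywords.any (fun keyword =>
        PySem.Str.isIn (PySem.Str.lower keyword) word || PySem.Str.isIn word (PySem.Str.lower keyword)) then
      some topic
    else pvSubLoop word rest

def classify_word (word_data : List (String × String)) (topic_keywords : List (String × List String)) : String :=
  match PySem.Dict.get? (PySem.Dict.mk word_data) "word" with
  | none => ""  -- word_data['word'] raises KeyError; excluded by Pre_classify_word
  | some w =>
    let word := PySem.Str.lower w
    match pvExactLoop word topic_keywords with
    | some topic => topic
    | none =>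
      match pvSubLoop word topic_keywords with
      | some topic => topic
      | none => "GENERAL & COMMON"

-- ===== PORT B =====
-- single loop of B, carrying the fallback (first substring-matching topic so far)
def pvScanLoop (word : String) (fallback : Option String) : List (String × List String) → String
  | [] => fallback.getD "GENERAL & COMMON"
  | (topic, keywords) :: rest =>
    let lows := keywords.map (fun kw => PySem.Str.lower kw)
    if lows.contains word then topic
    else if fallback.isNone &&
        lows.any (fun k => PySem.Str.isIn k word || PySem.Str.isIn word k) then
      pvScanLoop word (some topic) rest
    else pvScanLoop word fallback rest

def classify_word_alt (word_data : List (String × String)) (topic_keywords : List (String × List String)) : String :=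
  match PySem.Dict.get? (PySem.Dict.mk word_data) "word" with
  | none => ""  -- unreachable under Pre_classify_word
  | some w =>
    pvScanLoop (PySem.Str.lower w) none topic_keywords

-- ===== PRECONDITION & SPEC =====
-- A raises KeyError when word_data has no 'word' key; exactly that is excluded.
def Pre_classify_word (word_data : List (String × String)) (topic_keywords : List (String × List String)) : Prop :=
  (PySem.Dict.get? (PySem.Dict.mk word_data) "word").isSome = true
instance (word_data : List (String × String)) (topic_keywords : List (String × List String)) : Decidable (Pre_classify_word word_data topic_keywords) := by unfold Pre_classify_word; infer_instance

def pvWitness_classify_word : (List (String × String)) × (List (String × List String)) :=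
  ([("word", "Cat")], [("ANIMALS", ["cat", "dog"]), ("FOOD", ["bread"])])

def Spec_classify_word (word_data : List (String × String)) (topic_keywords : List (String × List String)) (out : String) : Prop := out = classify_word_alt word_data topic_keywords
instance (word_data : List (String × String)) (topic_keywords : List (String × List String)) (out : String) : Decidable (Spec_classify_word word_data topic_keywords out) := by unfold Spec_classify_word; infer_instance

-- ===== CLAIM (what is proved, stated in full; the proofs are below) =====
def Claim_equal_classify_word : Prop := ∀ (word_data : List (String × String)) (topic_keywords : List (String × List String)), Dom_classify_word word_data topic_keywords → Pre_classify_word word_data topic_keywords → Spec_classify_word word_data topic_keywords (classify_word word_data topic_keywords)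

-- ===== LEMMAS AND PROOFS =====

-- loop invariant of B: the single pass equals "first exact topic, else fallback, else first substring topic"
lemma pvScanLoop_eq (word : String) (tk : List (String × List String)) (fb : Option String) :
    pvScanLoop word fb tk =
      match pvExactLoop word tk with
      | some t => t
      | none => ((fb.orElse (fun _ => pvSubLoop word tk)).getD "GENERAL & COMMON") := by
  induction tk generalizing fb with
  | nil => cases fb <;> simp [pvScanLoop, pvExactLoop, pvSubLoop, Option.orElse]
  | cons hd rest ih =>
    obtain ⟨topic, keywords⟩ := hd
    by_cases hex : ∃ a ∈ keywords, PySem.Str.lower a = word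
    · simp [pvScanLoop, pvExactLoop, hex]
    · by_cases hsub : ∃ x ∈ keywords,
          PySem.Chars.isIn (PySem.Chars.lower x.toList) word.toList = true ∨
            PySem.Chars.isIn word.toList (PySem.Chars.lower x.toList) = true
      · cases fb <;>
          simp [pvScanLoop, pvExactLoop, pvSubLoop, hex, hsub, ih, Option.orElse]
      · cases fb <;>
          simp [pvScanLoop, pvExactLoop, pvSubLoop, hex, hsub, ih, Option.orElse]

-- ===== VERDICT (by name: the statement is the Claim_ definition above) =====
theorem classify_word_spec : Claim_equal_classify_word := by
  intro word_data topic_keywords _hdom hpre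
  unfold Pre_classify_word at hpre
  unfold Spec_classify_word classify_word classify_word_alt
  cases hw : PySem.Dict.get? (PySem.Dict.mk word_data) "word" with
  | none => simp [hw] at hpre
  | some w =>
    simp only [pvScanLoop_eq]
    cases pvExactLoop (PySem.Str.lower w) topic_keywords with
    | some t => rfl
    | none =>
      cases pvSubLoop (PySem.Str.lower w) topic_keywords with
      | some t => rfl
      | none => rfl
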